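-- pv_equiv track=rewrite | github.com/syjoy1993/python_2024 | day15/1_review_sol.py | solution
-- ===== SOURCE A (Python) =====
-- def solution(phone_number):
--     newNumber = ""
--     for index,item in enumerate(phone_number):
--         if len(phone_number) - 4 > index:
--             #어떤 번호 길이던 4자 뒤에는 제외됌
--             newNumber += "*"
--         else:
--             newNumber += item
--     return newNumber
-- ===== SOURCE B (Python) =====
-- def solution(phone_number):
--     return "*" * (len(phone_number) - 4) + phone_number[-4:]
-- ===== Notes on version B (the rewrite author's own statement) =====
-- stated objective: simpler
-- what changed: Replaces the per-character enumerate loop with a single closed-form expression: a repeated-asterisk prefix plus the [-4:] suffix slice, with no iteration or branch.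
import Mathlib
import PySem

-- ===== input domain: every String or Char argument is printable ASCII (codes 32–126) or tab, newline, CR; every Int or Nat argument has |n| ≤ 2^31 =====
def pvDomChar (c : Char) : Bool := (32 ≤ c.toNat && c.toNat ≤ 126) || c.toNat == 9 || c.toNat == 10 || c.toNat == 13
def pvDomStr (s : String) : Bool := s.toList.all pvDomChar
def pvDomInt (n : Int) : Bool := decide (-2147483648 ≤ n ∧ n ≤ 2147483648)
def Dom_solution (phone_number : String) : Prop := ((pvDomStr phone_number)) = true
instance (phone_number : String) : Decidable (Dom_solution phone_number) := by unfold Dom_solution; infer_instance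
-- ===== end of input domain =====

-- B replaces A's per-character loop and branch with a closed-form mask: '*'-repeat prefix ++ [-4:] slice (objective: simpler).

-- ===== PORT A =====
-- for index, item in enumerate(phone_number): newNumber += '*' if len-4 > index else item
def solution (phone_number : String) : String :=
  String.mk ((PySem.List.enumerate phone_number.toList 0).foldl
    (fun acc p =>
      acc ++ [if (phone_number.toList.length : Int) - 4 > p.1 then '*' else p.2]) [])

-- ===== PORT B =====
-- "*" * (len(phone_number) - 4) + phone_number[-4:]
def solution_alt (phone_number : String) : String :=
  String.mk (PySem.List.pyRepeat ['*'] ((phone_number.toList.length : Int) - 4) ++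
    PySem.List.slice phone_number.toList (some (-4)) none)

-- ===== PRECONDITION & SPEC =====
def Spec_solution (phone_number : String) (out : String) : Prop := out = solution_alt phone_number
instance (phone_number : String) (out : String) : Decidable (Spec_solution phone_number out) := by unfold Spec_solution; infer_instance

-- ===== CLAIM (what is proved, stated in full; the proofs are below) =====
def Claim_equal_solution : Prop := ∀ (phone_number : String), Dom_solution phone_number → Spec_solution phone_number (solution phone_number)

-- ===== LEMMAS AND PROOFS =====

theorem pv_foldl_push {α β : Type} (g : α → β) :
    ∀ (l : List α) (a : List β),
      List.foldl (fun acc x => acc ++ [g x]) a l = a ++ l.map g := by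
  intro l
  induction l with
  | nil => simp
  | cons x xs ih => intro a; simp [List.foldl, ih]

theorem pv_mask_eq (L : List Char) :
    (PySem.List.enumerate L 0).map
        (fun p => if (L.length : Int) - 4 > p.1 then '*' else p.2)
      = PySem.List.pyRepeat ['*'] ((L.length : Int) - 4) ++
          PySem.List.slice L (some (-4)) none := by
  rw [PySem.List.pyRepeat_singleton]
  rw [show ((-4 : Int)) = -((4 : Nat) : Int) by norm_num,
    PySem.List.slice_from_neg_natCast L 4 (by norm_num)]
  apply List.ext_getElem
  · simp [PySem.List.length_enumerate]
    omega
  · intro i h1 h2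
    have hi : i < L.length := by simpa [PySem.List.length_enumerate] using h1
    rw [List.getElem_map, PySem.List.getElem_enumerate]
    simp only [List.getElem_append, List.getElem_replicate, List.getElem_drop]
    split_ifs with hA hB hB
    · rfl
    · exfalso; simp [List.length_replicate] at hB; omega
    · exfalso; simp [List.length_replicate] at hB; omega
    · congr 1
      simp [List.length_replicate] at hB ⊢
      omega

-- ===== VERDICT (by name: the statement is the Claim_ definition above) =====
theorem solution_spec : Claim_equal_solution := by
  intro p _
  unfold Spec_solution solution solution_alt
  rw [pv_foldl_push, List.nil_append, pv_mask_eq]
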